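-- pv_equiv track=rewrite | github.com/no-design-foundry/filters-pan | pan/pan.py | create_segments
-- ===== SOURCE A (Python) =====
-- def create_segments(x, y):
--     segments = []
--     start = 0
--     for i in range(len(y)):
--         if not y[i]:
--             segments.append((x[start], x[i]))
--             start = i + 1
--     if start < len(x):
--         segments.append((x[start], x[-1]))
--     return segments
-- ===== SOURCE B (Python) =====
-- def create_segments(x, y):
--     # Right-to-left scan: build the segments back-to-front, then reverse once.
--     res = []
--     p = None  # nearest falsy index seen so far (to the right)
--     for i in range(len(y) - 1, -1, -1):
--         if not y[i]:
--             if p is None: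
--                 if i + 1 < len(x):
--                     res.append((x[i + 1], x[-1]))
--             else:
--                 res.append((x[i + 1], x[p]))
--             p = i
--     if p is None:
--         if len(x) > 0:
--             res.append((x[0], x[-1]))
--     else:
--         res.append((x[0], x[p]))
--     res.reverse()
--     return res
-- ===== Notes on version B (the rewrite author's own statement) =====
-- stated objective: alternative
-- what changed: Replaces A's left-to-right scan with a running start by a right-to-left scan that builds the segments back-to-front (tracking the nearest falsy index to the right) and reverses the list once at the end.
import Mathlib
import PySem

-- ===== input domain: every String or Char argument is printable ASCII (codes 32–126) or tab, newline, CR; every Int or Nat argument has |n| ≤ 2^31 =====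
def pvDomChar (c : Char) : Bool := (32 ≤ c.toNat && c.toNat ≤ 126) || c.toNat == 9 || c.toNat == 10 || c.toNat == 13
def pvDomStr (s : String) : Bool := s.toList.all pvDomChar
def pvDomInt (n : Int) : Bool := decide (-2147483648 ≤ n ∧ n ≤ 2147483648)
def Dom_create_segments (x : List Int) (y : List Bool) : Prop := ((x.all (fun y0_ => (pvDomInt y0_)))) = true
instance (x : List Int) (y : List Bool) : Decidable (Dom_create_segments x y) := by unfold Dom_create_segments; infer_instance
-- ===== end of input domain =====

-- B scans y right-to-left, building the segments back-to-front (tracking the nearest falsy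
-- index to the right) and reversing once; same linear cost, opposite traversal order.

-- ===== PORT A =====
def create_segments (x : List Int) (y : List Bool) : List (Int × Int) :=
  let st := (PySem.List.pyRange 0 (PySem.List.len y) 1).foldl
    (fun (s : List (Int × Int) × Int) i =>
      if PySem.List.pyGetD y i false = false then
        (s.1 ++ [(PySem.List.pyGetD x s.2 0, PySem.List.pyGetD x i 0)], i + 1)
      else s) ([], 0)
  if st.2 < PySem.List.len x then
    st.1 ++ [(PySem.List.pyGetD x st.2 0, PySem.List.pyGetD x (-1) 0)]
  else st.1

-- ===== PORT B =====
-- B-side helper: the loop body of B's right-to-left scan (one Python iteration)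
def pvStepB (x : List Int) (s : List (Int × Int) × Option Int) (i : Int) : List (Int × Int) × Option Int :=
  match s.2 with
  | none =>
    (if i + 1 < PySem.List.len x then
       s.1 ++ [(PySem.List.pyGetD x (i + 1) 0, PySem.List.pyGetD x (-1) 0)]
     else s.1, some i)
  | some p =>
    (s.1 ++ [(PySem.List.pyGetD x (i + 1) 0, PySem.List.pyGetD x p 0)], some i)

def create_segments_alt (x : List Int) (y : List Bool) : List (Int × Int) :=
  let st := (PySem.List.pyRange (PySem.List.len y - 1) (-1) (-1)).foldl
    (fun (s : List (Int × Int) × Option Int) i =>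
      if PySem.List.pyGetD y i false = false then pvStepB x s i
      else s) ([], none)
  let res := match st.2 with
    | none =>
      if 0 < PySem.List.len x then
        st.1 ++ [(PySem.List.pyGetD x 0 0, PySem.List.pyGetD x (-1) 0)]
      else st.1
    | some p => st.1 ++ [(PySem.List.pyGetD x 0 0, PySem.List.pyGetD x p 0)]
  res.reverse

-- ===== PRECONDITION & SPEC =====
-- Pre_ excludes exactly the inputs on which Python A raises IndexError:
-- a falsy y[i] at an index i ≥ len(x) makes A evaluate x[i] (or x[start]) out of range.
def Pre_create_segments (x : List Int) (y : List Bool) : Prop :=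
  ∀ i : Nat, i < y.length → y.getD i true = false → i < x.length
instance (x : List Int) (y : List Bool) : Decidable (Pre_create_segments x y) := by
  unfold Pre_create_segments; infer_instance

def pvWitness_create_segments : List Int × List Bool := ([1, 2, 3], [true, false, true])

def Spec_create_segments (x : List Int) (y : List Bool) (out : List (Int × Int)) : Prop := out = create_segments_alt x y
instance (x : List Int) (y : List Bool) (out : List (Int × Int)) : Decidable (Spec_create_segments x y out) := by unfold Spec_create_segments; infer_instance

-- ===== CLAIM (what is proved, stated in full; the proofs are below) =====
def Claim_equal_create_segments : Prop := ∀ (x : List Int) (y : List Bool), Dom_create_segments x y → Pre_create_segments x y → Spec_create_segments x y (create_segments x y)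

-- ===== LEMMAS AND PROOFS =====

-- last start value after processing the breaks bs from start s0 (A's running start)
def pvLast (s0 : Int) : List Int → Int
  | [] => s0
  | b :: bs => pvLast (b + 1) bs

-- B's accumulator after folding its step over bs.reverse (segments in reverse order)
def pvG (x : List Int) : List Int → List (Int × Int)
  | [] => []
  | [b] => if b + 1 < (x.length : Int) then
             [(PySem.List.pyGetD x (b + 1) 0, PySem.List.pyGetD x (-1) 0)]
           else []
  | b :: b' :: t => pvG x (b' :: t) ++ [(PySem.List.pyGetD x (b + 1) 0, PySem.List.pyGetD x b' 0)]

lemma pvFold_eq (x : List Int) (bs : List Int) (acc : List (Int × Int)) (s0 : Int) :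
    bs.foldl (fun (s : List (Int × Int) × Int) i =>
        (s.1 ++ [(PySem.List.pyGetD x s.2 0, PySem.List.pyGetD x i 0)], i + 1)) (acc, s0)
      = (acc ++ ((s0 :: bs.map (· + 1)).zip bs).map
          (fun p => (PySem.List.pyGetD x p.1 0, PySem.List.pyGetD x p.2 0)),
         pvLast s0 bs) := by
  induction bs generalizing acc s0 with
  | nil => simp [pvLast]
  | cons b bs ih =>
    simp only [List.foldl_cons, List.map_cons, List.zip_cons_cons, List.map, pvLast]
    rw [ih]
    simp

lemma pvBFold_eq (x : List Int) (bs : List Int) :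
    bs.reverse.foldl (pvStepB x) ([], none)
      = (pvG x bs, bs.head?) := by
  induction bs with
  | nil => rfl
  | cons b bs ih =>
    rw [List.reverse_cons, List.foldl_append, ih]
    cases bs with
    | nil => simp [pvG, pvStepB]
    | cons b' t => simp [pvG, pvStepB]

lemma pvG_reverse (x : List Int) (t : List Int) (b : Int) :
    (pvG x (b :: t)).reverse
      = (((b + 1) :: t.map (· + 1)).zip t).map
          (fun p => (PySem.List.pyGetD x p.1 0, PySem.List.pyGetD x p.2 0))
        ++ (if pvLast (b + 1) t < (x.length : Int) then
              [(PySem.List.pyGetD x (pvLast (b + 1) t) 0, PySem.List.pyGetD x (-1) 0)]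
            else []) := by
  induction t generalizing b with
  | nil =>
    simp only [pvG, pvLast, List.map_nil, List.zip_nil_right, List.map_nil, List.nil_append]
    split <;> simp
  | cons b' t ih =>
    simp only [pvG, pvLast, List.reverse_append, List.reverse_cons, List.reverse_nil,
      List.nil_append, List.map_cons, List.zip_cons_cons, List.map, List.cons_append]
    rw [ih b']

-- ===== VERDICT (by name: the statement is the Claim_ definition above) =====
theorem create_segments_spec : Claim_equal_create_segments := by
  intro x y _ _
  show create_segments x y = create_segments_alt x y
  simp only [create_segments, create_segments_alt, PySem.List.len_eq]
  rw [PySem.List.foldl_ite_eq_foldl_filter, pvFold_eq]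
  have hrev : PySem.List.pyRange ((y.length : Int) - 1) (-1) (-1)
      = (PySem.List.pyRange 0 (y.length : Int) 1).reverse := by
    rw [PySem.List.pyRange_neg_one_eq_reverse]; norm_num
  rw [hrev, PySem.List.foldl_ite_eq_foldl_filter, List.filter_reverse, pvBFold_eq]
  set bks := (PySem.List.pyRange 0 (y.length : Int) 1).filter
      (fun i => decide (PySem.List.pyGetD y i false = false)) with hb
  cases bks with
  | nil =>
    simp only [pvG, pvLast, List.head?_nil]
    split <;> simp
  | cons b t =>
    simp only [List.head?_cons, pvLast, List.map_cons, List.zip_cons_cons, List.map,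
      List.reverse_append, List.reverse_cons, List.reverse_nil, List.nil_append]
    rw [pvG_reverse]
    split <;> simp
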